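-- pv_equiv track=rewrite | github.com/kbbcompany00/viper | vipersec/modules/auth.py | _is_login_form
-- ===== SOURCE A (Python) =====
-- from typing import Dict, List, Any, Optional
--
-- def _is_login_form(form: Dict[str, Any]) -> bool:
--     """Check if form is a login form"""
--
--     has_password = False
--     has_username = False
--
--     for input_field in form.get('inputs', []):
--         input_name = input_field.get('name', '').lower()
--         input_type = input_field.get('type', '').lower()
--
--         if input_type == 'password':
--             has_password = True
--         elif any(keyword in input_name for keyword in ['user', 'login', 'email']):
--             has_username = True
--
--     return has_password and has_username
-- ===== SOURCE B (Python) =====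
-- def _is_login_form(form):
--     """Check if form is a login form"""
--     inputs = form.get('inputs', [])
--     has_password = any(
--         f.get('type', '').lower() == 'password' for f in inputs)
--     has_username = any(
--         f.get('type', '').lower() != 'password'
--         and any(kw in f.get('name', '').lower() for kw in ['user', 'login', 'email'])
--         for f in inputs)
--     return has_password and has_username
-- ===== Notes on version B (the rewrite author's own statement) =====
-- stated objective: idiomatic
-- what changed: Replaces the single loop accumulating two mutable flags with two independent any() scans (password scan, and a username scan guarded by type != 'password' to keep the elif semantics), combined at the end.
import Mathlib
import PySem

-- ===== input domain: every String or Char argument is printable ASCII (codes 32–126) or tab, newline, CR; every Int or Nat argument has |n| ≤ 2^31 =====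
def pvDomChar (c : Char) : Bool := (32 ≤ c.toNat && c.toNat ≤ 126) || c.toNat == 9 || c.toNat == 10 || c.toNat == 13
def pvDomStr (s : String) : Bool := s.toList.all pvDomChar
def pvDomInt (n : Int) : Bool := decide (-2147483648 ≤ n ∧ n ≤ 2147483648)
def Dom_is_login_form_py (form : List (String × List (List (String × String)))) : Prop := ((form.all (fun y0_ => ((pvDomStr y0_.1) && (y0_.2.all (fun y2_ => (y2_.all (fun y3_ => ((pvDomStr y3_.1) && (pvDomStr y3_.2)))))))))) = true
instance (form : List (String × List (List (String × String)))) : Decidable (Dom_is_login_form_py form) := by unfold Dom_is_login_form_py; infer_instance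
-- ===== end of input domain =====

-- B replaces A's single flag-accumulating loop with two independent any-scans (idiomatic decomposition; same cost).


-- ===== PORT A =====
-- field.get(k, dflt) on an association-list dict
def pvGetStr (field : List (String × String)) (k : String) : String :=
  (PySem.Dict.mk field).getD k ""

-- the body of A's for-loop: updates (has_password, has_username) for one input_field
def pvStepA (st : Bool × Bool) (input_field : List (String × String)) : Bool × Bool :=
  let input_name := PySem.Str.lower (pvGetStr input_field "name")
  let input_type := PySem.Str.lower (pvGetStr input_field "type")
  if input_type == "password" then (true, st.2)
  else if ["user", "login", "email"].any (fun kw => PySem.Str.isIn kw input_name) then (st.1, true)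
  else st

def is_login_form_py (form : List (String × List (List (String × String)))) : Bool :=
  let inputs := (PySem.Dict.mk form).getD "inputs" []
  let st := inputs.foldl pvStepA (false, false)
  st.1 && st.2

-- ===== PORT B =====
def is_login_form_py_alt (form : List (String × List (List (String × String)))) : Bool :=
  let inputs := (PySem.Dict.mk form).getD "inputs" []
  let has_password := inputs.any (fun f =>
    PySem.Str.lower (pvGetStr f "type") == "password")
  let has_username := inputs.any (fun f =>
    (PySem.Str.lower (pvGetStr f "type") != "password")
    && ["user", "login", "email"].any (fun kw => PySem.Str.isIn kw (PySem.Str.lower (pvGetStr f "name"))))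
  has_password && has_username

-- ===== PRECONDITION & SPEC =====
def Spec_is_login_form_py (form : List (String × List (List (String × String)))) (out : Bool) : Prop := out = is_login_form_py_alt form
instance (form : List (String × List (List (String × String)))) (out : Bool) : Decidable (Spec_is_login_form_py form out) := by unfold Spec_is_login_form_py; infer_instance

-- ===== CLAIM (what is proved, stated in full; the proofs are below) =====
def Claim_equal_is_login_form_py : Prop := ∀ (form : List (String × List (List (String × String)))), Dom_is_login_form_py form → Spec_is_login_form_py form (is_login_form_py form)

-- ===== LEMMAS AND PROOFS =====
theorem foldl_flags (l : List (List (String × String))) (a b : Bool) :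
    l.foldl pvStepA (a, b)
    = (a || l.any (fun f => PySem.Str.lower (pvGetStr f "type") == "password"),
       b || l.any (fun f =>
         (PySem.Str.lower (pvGetStr f "type") != "password")
         && ["user", "login", "email"].any (fun kw => PySem.Str.isIn kw (PySem.Str.lower (pvGetStr f "name"))))) := by
  induction l generalizing a b with
  | nil => simp
  | cons x xs ih =>
    rw [List.foldl_cons]
    by_cases h1 : (PySem.Str.lower (pvGetStr x "type") == "password") = true
    · rw [show pvStepA (a, b) x = (true, b) from by simp only [pvStepA]; rw [if_pos h1], ih]
      simp only [List.any_cons, Prod.mk.injEq]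
      constructor
      · simp [h1, Bool.or_assoc]
      · have hbne : (PySem.Str.lower (pvGetStr x "type") != "password") = false := by
          simp [bne, h1]
        simp [hbne]
    · by_cases h2 : (["user", "login", "email"].any
          (fun kw => PySem.Str.isIn kw (PySem.Str.lower (pvGetStr x "name")))) = true
      · rw [show pvStepA (a, b) x = (a, true) from by
            simp only [pvStepA]; rw [if_neg h1, if_pos h2], ih]
        have hbne : (PySem.Str.lower (pvGetStr x "type") != "password") = true := by
          simp [bne]; simpa using h1
        simp only [List.any_cons, Prod.mk.injEq, hbne, Bool.true_and, Bool.or_assoc]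
        constructor
        · have : (PySem.Str.lower (pvGetStr x "type") == "password") = false := by
            simpa using h1
          simp [this]
        · have h2' := h2
          simp only [List.any_cons, List.any_nil, Bool.or_false] at h2'
          cases b
          · simp only [Bool.false_or, Bool.true_or]
            simp
            have h2'' := h2'
            simp at h2''
            rcases h2'' with h | h | h
            · exact Or.inl h
            · exact Or.inr (Or.inl h)
            · exact Or.inr (Or.inr (Or.inl h))
          · simp
      · rw [show pvStepA (a, b) x = (a, b) from by
            simp only [pvStepA]; rw [if_neg h1, if_neg h2], ih]
        have hK := h2
        simp at hK
        obtain ⟨k1, k2, k3⟩ := hK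
        have hb : (PySem.Str.lower (pvGetStr x "type") == "password") = false := by
          simpa using h1
        simp [k1, k2, k3, hb]

-- ===== VERDICT (by name: the statement is the Claim_ definition above) =====
theorem is_login_form_py_spec : Claim_equal_is_login_form_py := by
  intro form _
  show is_login_form_py form = is_login_form_py_alt form
  unfold is_login_form_py is_login_form_py_alt
  simp only []
  rw [foldl_flags]
  simp
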